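-- pv_equiv track=rewrite | github.com/Shineii86/LeechBot | leechbot/utility/style.py | style_title
-- ===== SOURCE A (Python) =====
-- SMALL_CAPS_MAP = {
--     'a': 'ᴀ', 'b': 'ʙ', 'c': 'ᴄ', 'd': 'ᴅ', 'e': 'ᴇ',
--     'f': 'ғ', 'g': 'ɢ', 'h': 'ʜ', 'i': 'ɪ', 'j': 'ᴊ',
--     'k': 'ᴋ', 'l': 'ʟ', 'm': 'ᴍ', 'n': 'ɴ', 'o': 'ᴏ',
--     'p': 'ᴘ', 'q': 'ҩ', 'r': 'ʀ', 's': 's', 't': 'ᴛ',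
--     'u': 'ᴜ', 'v': 'ᴠ', 'w': 'ᴡ', 'x': 'x', 'y': 'ʏ',
--     'z': 'ᴢ'
-- }
--
-- def to_small_caps(text: str) -> str:
--     """Convert lowercase letters to small caps Unicode; leave other characters unchanged."""
--     return ''.join(SMALL_CAPS_MAP.get(c, c) for c in text)
--
-- def style_title(text: str) -> str:
--     """
--     Convert text to Title Case with small caps for lowercase letters.
--     First letter of each word is normal uppercase, rest small caps.
--     """
--     words = text.split(' ')
--     styled_words = []
--     for w in words:
--         if not w:
--             styled_words.append(w)
--             continue
--         styled = w[0].upper() + to_small_caps(w[1:].lower())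
--         styled_words.append(styled)
--     return ' '.join(styled_words)
-- ===== SOURCE B (Python) =====
-- SMALL_CAPS = "\u1d00\u0299\u1d04\u1d05\u1d07\u0493\u0262\u029c\u026a\u1d0a\u1d0b\u029f\u1d0d\u0274\u1d0f\u1d18\u04a9\u0280s\u1d1b\u1d1c\u1d20\u1d21x\u028f\u1d22"
--
-- def style_title(text: str) -> str:
--     """Single pass with a word-start flag; small caps taken from an indexed string by code arithmetic (no dict, no split/join)."""
--     out = []
--     at_word_start = True
--     for c in text:
--         if c == ' ':
--             out.append(' ')
--             at_word_start = True
--         elif at_word_start: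
--             out.append(c.upper())
--             at_word_start = False
--         else:
--             lc = c.lower()
--             out.append(SMALL_CAPS[ord(lc) - 97] if 'a' <= lc <= 'z' else lc)
--     return ''.join(out)
-- ===== Notes on version B (the rewrite author's own statement) =====
-- stated objective: alternative
-- what changed: Replaces the space-split/per-word slicing/dict-lookup/join with one linear pass driven by a word-start flag, taking small caps from an indexed 26-character string by code arithmetic instead of a dict.
import Mathlib
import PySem

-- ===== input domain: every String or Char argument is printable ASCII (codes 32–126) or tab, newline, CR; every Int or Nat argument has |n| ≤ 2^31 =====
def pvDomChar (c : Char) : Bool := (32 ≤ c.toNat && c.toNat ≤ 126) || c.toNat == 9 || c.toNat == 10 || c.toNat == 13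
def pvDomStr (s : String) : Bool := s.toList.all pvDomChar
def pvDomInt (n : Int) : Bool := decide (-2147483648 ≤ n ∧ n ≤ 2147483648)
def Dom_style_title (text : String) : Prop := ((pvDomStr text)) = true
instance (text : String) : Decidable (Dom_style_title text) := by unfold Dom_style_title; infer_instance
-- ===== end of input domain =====

-- B replaces A's space-split / per-word slicing / dict-lookup / join with one linear foldl pass over the characters driven by a word-start flag, indexing a 26-character small-caps string by code arithmetic (same cost, different shape).


-- ===== PORT A =====
-- SMALL_CAPS_MAP: the module dict (every value is a single code point), as an association list
def SMALL_CAPS_MAP : List (Char × Char) :=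
  [('a', 'ᴀ'), ('b', 'ʙ'), ('c', 'ᴄ'), ('d', 'ᴅ'), ('e', 'ᴇ'),
   ('f', 'ғ'), ('g', 'ɢ'), ('h', 'ʜ'), ('i', 'ɪ'), ('j', 'ᴊ'),
   ('k', 'ᴋ'), ('l', 'ʟ'), ('m', 'ᴍ'), ('n', 'ɴ'), ('o', 'ᴏ'),
   ('p', 'ᴘ'), ('q', 'ҩ'), ('r', 'ʀ'), ('s', 's'), ('t', 'ᴛ'),
   ('u', 'ᴜ'), ('v', 'ᴠ'), ('w', 'ᴡ'), ('x', 'x'), ('y', 'ʏ'),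
   ('z', 'ᴢ')]

-- SMALL_CAPS_MAP.get(c, c)
def scGet (c : Char) : Char := ((SMALL_CAPS_MAP.lookup c).getD c)

-- to_small_caps: ''.join(SMALL_CAPS_MAP.get(c, c) for c in text)
def toSmallCaps (cs : List Char) : List Char := cs.map scGet

-- the loop body of A: if not w: w  else  w[0].upper() + to_small_caps(w[1:].lower())
def styleWordA (w : List Char) : List Char :=
  match w with
  | [] => []
  | c :: rest => PySem.Chars.upperChar c :: toSmallCaps (PySem.Chars.lower rest)

def style_title (text : String) : String :=
  String.ofList (PySem.Chars.join [' ']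
    ((PySem.Chars.splitOn text.toList [' ']).map styleWordA))

-- ===== PORT B =====
-- SMALL_CAPS = "ᴀʙᴄ…ᴢ" (Source B): the 26 small-cap code points as a list, indexed by ord(lc) - 97
def SMALL_CAPS : List Char :=
  ['ᴀ', 'ʙ', 'ᴄ', 'ᴅ', 'ᴇ', 'ғ', 'ɢ', 'ʜ', 'ɪ', 'ᴊ', 'ᴋ', 'ʟ', 'ᴍ',
   'ɴ', 'ᴏ', 'ᴘ', 'ҩ', 'ʀ', 's', 'ᴛ', 'ᴜ', 'ᴠ', 'ᴡ', 'x', 'ʏ', 'ᴢ']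

-- SMALL_CAPS[ord(lc) - 97] if 'a' <= lc <= 'z' else lc  (the index is always in range when the guard holds)
def smallOf (lc : Char) : Char :=
  if 'a' ≤ lc ∧ lc ≤ 'z' then (PySem.List.pyGet? SMALL_CAPS ((lc.toNat : Int) - 97)).getD lc
  else lc

-- one step of Source B's for-loop: state = (collected output, at_word_start)
def styStep (st : List Char × Bool) (c : Char) : List Char × Bool :=
  if c = ' ' then (st.1 ++ [' '], true)
  else if st.2 then (st.1 ++ [PySem.Chars.upperChar c], false)
  else (st.1 ++ [smallOf (PySem.Chars.lowerChar c)], false)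

def style_title_alt (text : String) : String :=
  String.ofList (text.toList.foldl styStep ([], true)).1

-- ===== PRECONDITION & SPEC =====
def Spec_style_title (text : String) (out : String) : Prop := out = style_title_alt text
instance (text : String) (out : String) : Decidable (Spec_style_title text out) := by unfold Spec_style_title; infer_instance

-- ===== CLAIM (what is proved, stated in full; the proofs are below) =====
def Claim_equal_style_title : Prop := ∀ (text : String), Dom_style_title text → Spec_style_title text (style_title text)

-- ===== LEMMAS AND PROOFS =====

-- PySem's fuelled splitOn with the one-char separator [' '] is List.splitOnP (· == ' ')
lemma splitOn_go_space (l : List Char) : ∀ (fuel : Nat) (cur : List Char) (acc : List (List Char)),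
    l.length < fuel →
    PySem.Chars.splitOn.go [' '] fuel l cur acc
      = acc.reverse ++ (l.splitOnP (· == ' ')).modifyHead (cur.reverse ++ ·) := by
  induction l with
  | nil =>
    intro fuel cur acc hf
    match fuel, hf with
    | fuel + 1, _ => simp [PySem.Chars.splitOn.go, List.splitOnP_nil]
  | cons c rest ih =>
    intro fuel cur acc hf
    match fuel, hf with
    | fuel + 1, hf =>
      rw [List.splitOnP_cons]
      by_cases hc : c = ' '
      · subst hc
        have : ([' '] : List Char).isPrefixOf (' ' :: rest) = true := by
          simp [List.isPrefixOf]
        simp only [PySem.Chars.splitOn.go, this, if_true, List.length_cons,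
          List.length_nil, List.drop_succ_cons, List.drop_zero]
        rw [ih fuel [] (cur.reverse :: acc) (by simpa using Nat.lt_of_succ_lt_succ hf)]
        obtain ⟨w, ws, hws⟩ := List.exists_cons_of_ne_nil (List.splitOnP_ne_nil (· == ' ') rest)
        simp [hws]
      · have hpre : ([' '] : List Char).isPrefixOf (c :: rest) = false := by
          simp [List.isPrefixOf]; intro h; exact hc h.symm
        simp only [PySem.Chars.splitOn.go, hpre, Bool.false_eq_true, if_neg, if_neg hc,
          beq_iff_eq, not_false_eq_true]
        rw [ih fuel (c :: cur) acc (Nat.lt_of_succ_lt_succ hf)]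
        obtain ⟨w, ws, hws⟩ := List.exists_cons_of_ne_nil (List.splitOnP_ne_nil (· == ' ') rest)
        simp [hws]

lemma splitOn_space (cs : List Char) :
    PySem.Chars.splitOn cs [' '] = cs.splitOnP (· == ' ') := by
  unfold PySem.Chars.splitOn
  rw [splitOn_go_space cs (cs.length + 1) [] [] (Nat.lt_succ_self _)]
  obtain ⟨w, ws, hws⟩ := List.exists_cons_of_ne_nil (List.splitOnP_ne_nil (· == ' ') cs)
  simp [hws]

-- the spacer part of the joined output, after the first word
def restPart : List (List Char) → List Char
  | [] => []
  | w :: ws => ' ' :: (styleWordA w ++ restPart ws)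

lemma join_map (ws : List (List Char)) : ∀ (w : List Char),
    PySem.Chars.join [' '] ((w :: ws).map styleWordA) = styleWordA w ++ restPart ws := by
  induction ws with
  | nil => intro w; simp [PySem.Chars.join_singleton, restPart]
  | cons w' ws' ih =>
    intro w
    simp only [List.map_cons, PySem.Chars.join_cons_cons, restPart]
    rw [show styleWordA w' :: List.map styleWordA ws' = List.map styleWordA (w' :: ws') from rfl,
      ih w']
    simp

-- per-char processing of a non-initial character agrees between the two ports
lemma styleWordA_cons (c : Char) (rest : List Char) :
    styleWordA (c :: rest) = PySem.Chars.upperChar c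
      :: rest.map (fun d => scGet (PySem.Chars.lowerChar d)) := by
  simp [styleWordA, toSmallCaps, PySem.Chars.lower, List.map_map, Function.comp]

-- A's dict lookup agrees with B's indexed string for every char below 128
lemma scGet_eq_smallOf_fin : ∀ n : Fin 128,
    scGet (PySem.Chars.lowerChar (Char.ofNat n)) = smallOf (PySem.Chars.lowerChar (Char.ofNat n)) := by
  decide

lemma scGet_eq_smallOf (c : Char) (h : c.toNat < 128) :
    scGet (PySem.Chars.lowerChar c) = smallOf (PySem.Chars.lowerChar c) := by
  have := scGet_eq_smallOf_fin ⟨c.toNat, h⟩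
  simpa [Char.ofNat_toNat] using this

lemma domChar_lt (c : Char) (h : pvDomChar c = true) : c.toNat < 128 := by
  simp [pvDomChar] at h; omega

-- Source B's fold, unfolded: its output list is a function g of the chars and the flag
def altChars : List Char → Bool → List Char
  | [], _ => []
  | c :: rest, atStart =>
    if c = ' ' then ' ' :: altChars rest true
    else if atStart then PySem.Chars.upperChar c :: altChars rest false
    else smallOf (PySem.Chars.lowerChar c) :: altChars rest false

lemma foldl_styStep (cs : List Char) : ∀ (acc : List Char) (b : Bool),
    (cs.foldl styStep (acc, b)).1 = acc ++ altChars cs b := by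
  induction cs with
  | nil => intro acc b; simp [altChars]
  | cons c rest ih =>
    intro acc b
    simp only [List.foldl_cons, altChars, styStep]
    by_cases hc : c = ' '
    · simp [hc, ih]
    · by_cases hb : b = true
      · simp [hc, hb, ih]
      · simp [hc, Bool.eq_false_iff.mpr hb, ih]

-- the invariant: the joined split of A equals B's pass with atStart = true,
-- and the mid-word rendering equals B's pass with atStart = false
lemma main_inv (cs : List Char) : ∀ (w : List Char) (ws : List (List Char)),
    cs.all pvDomChar = true →
    cs.splitOnP (· == ' ') = w :: ws →
    (styleWordA w ++ restPart ws = altChars cs true ∧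
     w.map (fun d => scGet (PySem.Chars.lowerChar d)) ++ restPart ws = altChars cs false) := by
  induction cs with
  | nil =>
    intro w ws _ h
    rw [List.splitOnP_nil] at h
    cases h
    simp [styleWordA, restPart, altChars]
  | cons c rest ih =>
    intro w ws hdom h
    rw [List.all_cons, Bool.and_eq_true] at hdom
    obtain ⟨hdc, hdrest⟩ := hdom
    rw [List.splitOnP_cons] at h
    obtain ⟨w', ws', hws⟩ := List.exists_cons_of_ne_nil (List.splitOnP_ne_nil (· == ' ') rest)
    obtain ⟨ih1, ih2⟩ := ih w' ws' hdrest hws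
    by_cases hc : c = ' '
    · subst hc
      simp only [hws, if_pos, beq_self_eq_true] at h
      cases h
      have ha : ∀ b, altChars (' ' :: rest) b = ' ' :: altChars rest true := by
        intro b; simp [altChars]
      constructor
      · rw [ha]
        show ' ' :: (styleWordA w' ++ restPart ws') = ' ' :: altChars rest true
        rw [ih1]
      · rw [ha]
        show ' ' :: (styleWordA w' ++ restPart ws') = ' ' :: altChars rest true
        rw [ih1]
    · rw [if_neg (by simpa using hc), hws] at h
      simp only [List.modifyHead] at h
      injection h with h1 h2
      subst h1; subst h2
      constructor
      · have ha : altChars (c :: rest) true = PySem.Chars.upperChar c :: altChars rest false := by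
          simp [altChars, hc]
        rw [styleWordA_cons, ha]
        show PySem.Chars.upperChar c :: (List.map _ w' ++ restPart ws') = _
        rw [ih2]
      · have hb : altChars (c :: rest) false
            = smallOf (PySem.Chars.lowerChar c) :: altChars rest false := by
          simp [altChars, hc]
        rw [hb]
        show scGet (PySem.Chars.lowerChar c) :: (List.map _ w' ++ restPart ws') = _
        rw [ih2, scGet_eq_smallOf c (domChar_lt c hdc)]

-- ===== VERDICT (by name: the statement is the Claim_ definition above) =====
theorem style_title_spec : Claim_equal_style_title := by
  intro text hdom
  show style_title text = style_title_alt text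
  unfold style_title style_title_alt
  obtain ⟨w, ws, hws⟩ :=
    List.exists_cons_of_ne_nil (List.splitOnP_ne_nil (· == ' ') text.toList)
  rw [splitOn_space, hws, join_map, foldl_styStep,
    (main_inv text.toList w ws (by simpa [pvDomStr, Dom_style_title, List.all_eq_true] using hdom) hws).1, List.nil_append]
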